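-- pv_equiv track=rewrite | github.com/softwaresirppi/holy-algorithms | combinations.py | generateSelections
-- ===== SOURCE A (Python) =====
-- def generateSelections(states, n, unique=False, order=True):
--     if n < 0:
--         raise Exception('Aw fuck off, mate.')
--     if n == 0:
--         return []
--     if n == 1:
--         return [[state] for state in states]
--     selections = []
--     for i, state in enumerate(states):
--         substates = []
--         if order:
--             substates.extend(states[:i])
--         if not unique:
--             substates.append(states[i])
--         substates.extend(states[i + 1:])
--         for subselection in generateSelections(substates, n - 1, unique, order):
--             selections.append([state] + subselection)
--     return selections
-- ===== SOURCE B (Python) =====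
-- def generateSelections(states, n, unique=False, order=True):
--     # Breadth-first (round-by-round) construction instead of A's depth-first recursion.
--     if n < 0:
--         raise Exception('Aw fuck off, mate.')
--     if n == 0:
--         return []
--     partial = [([], list(states))]
--     for _ in range(n):
--         if not partial:
--             break
--         nxt = []
--         for sel, pool in partial:
--             for i, x in enumerate(pool):
--                 if order:
--                     newpool = pool[:i] + pool[i + 1:] if unique else pool
--                 else:
--                     newpool = pool[i + 1:] if unique else pool[i:]
--                 nxt.append((sel + [x], newpool))
--         partial = nxt
--     return [sel for sel, _ in partial]
-- ===== Notes on version B (the rewrite author's own statement) =====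
-- stated objective: alternative
-- what changed: Replaces A's depth-first recursion (which rebuilds a substate list per branch and recurses n levels) with an iterative breadth-first construction: a single loop of n rounds expanding a worklist of (partial selection, remaining pool) pairs, no recursion and no n==1 special case.
import Mathlib
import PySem

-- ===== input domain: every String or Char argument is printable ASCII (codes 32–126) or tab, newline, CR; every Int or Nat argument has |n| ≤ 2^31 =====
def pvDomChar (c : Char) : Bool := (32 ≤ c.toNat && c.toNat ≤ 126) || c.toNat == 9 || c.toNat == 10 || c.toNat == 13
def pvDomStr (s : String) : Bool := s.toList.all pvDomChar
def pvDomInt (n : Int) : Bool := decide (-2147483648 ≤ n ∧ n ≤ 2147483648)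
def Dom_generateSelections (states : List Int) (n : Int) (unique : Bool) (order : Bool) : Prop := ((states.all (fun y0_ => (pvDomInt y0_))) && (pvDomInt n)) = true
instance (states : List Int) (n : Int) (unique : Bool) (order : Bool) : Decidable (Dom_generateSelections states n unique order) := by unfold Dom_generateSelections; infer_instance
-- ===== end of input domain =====

-- B replaces A's depth-first recursion with an iterative breadth-first expansion of
-- (partial selection, remaining pool) pairs; same output order, objective: alternative structure.

-- ===== PORT A =====
def generateSelections (states : List Int) (n : Int) (unique : Bool) (order : Bool) : List (List Int) :=
  if _h0 : n < 0 then []  -- the Python raises Exception here; excluded by Pre_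
  else if _h1 : n = 0 then []
  else if _h2 : n = 1 then states.map (fun state => [state])
  else
    (PySem.List.enumerate states).foldl (fun selections p =>
      let substates : List Int :=
        (if order then PySem.List.slice states none (some p.1) else [])
        ++ (if !unique then [PySem.List.pyGetD states p.1 0] else [])
        ++ PySem.List.slice states (some (p.1 + 1)) none
      selections ++ (generateSelections substates (n - 1) unique order).map
        (fun subselection => [p.2] ++ subselection)) []
termination_by n.toNat
decreasing_by omega

-- ===== PORT B =====
-- the remaining pool after choosing index i of pool (helper of the port)
def poolStepI (unique order : Bool) (pool : List Int) (i : Int) : List Int :=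
  if order then
    (if unique then PySem.List.slice pool none (some i) ++ PySem.List.slice pool (some (i + 1)) none
     else pool)
  else
    (if unique then PySem.List.slice pool (some (i + 1)) none
     else PySem.List.slice pool (some i) none)

-- one round: expand every (selection, pool) pair by each choice from its pool
def bRound (unique order : Bool) (partial_ : List (List Int × List Int)) : List (List Int × List Int) :=
  partial_.foldl (fun nxt sp =>
    (PySem.List.enumerate sp.2).foldl (fun nxt2 q =>
      nxt2 ++ [(sp.1 ++ [q.2], poolStepI unique order sp.2 q.1)]) nxt) []

-- the 'for _ in range(n)' loop with its 'if not partial: break' (counter recursion, early exit)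
def bLoop (unique order : Bool) : Nat → List (List Int × List Int) → List (List Int × List Int)
  | 0, partial_ => partial_
  | k + 1, partial_ =>
    if partial_ = [] then partial_
    else bLoop unique order k (bRound unique order partial_)

def generateSelections_alt (states : List Int) (n : Int) (unique : Bool) (order : Bool) : List (List Int) :=
  if n < 0 then []  -- the Python raises Exception here; excluded by Pre_
  else if n = 0 then []
  else
    (bLoop unique order n.toNat [([], states)]).map (fun sp => sp.1)

-- ===== PRECONDITION & SPEC =====
-- Pre_ excludes exactly n < 0, where the Python A raises Exception (B raises there too).
def Pre_generateSelections (states : List Int) (n : Int) (unique : Bool) (order : Bool) : Prop := 0 ≤ n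
instance (states : List Int) (n : Int) (unique : Bool) (order : Bool) : Decidable (Pre_generateSelections states n unique order) := by unfold Pre_generateSelections; infer_instance
def pvWitness_generateSelections : List Int × Int × Bool × Bool := ([1, 2, 3], 2, false, true)

def Spec_generateSelections (states : List Int) (n : Int) (unique : Bool) (order : Bool) (out : List (List Int)) : Prop := out = generateSelections_alt states n unique order
instance (states : List Int) (n : Int) (unique : Bool) (order : Bool) (out : List (List Int)) : Decidable (Spec_generateSelections states n unique order out) := by unfold Spec_generateSelections; infer_instance

-- ===== CLAIM (what is proved, stated in full; the proofs are below) =====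
def Claim_equal_generateSelections : Prop := ∀ (states : List Int) (n : Int) (unique : Bool) (order : Bool), Dom_generateSelections states n unique order → Pre_generateSelections states n unique order → Spec_generateSelections states n unique order (generateSelections states n unique order)

-- ===== LEMMAS AND PROOFS =====

-- A's recursion, reformulated on a Nat depth (proof-only characterisation of both ports)
def dfs (unique order : Bool) : Nat → List Int → List (List Int)
  | 0, _ => [[]]
  | k + 1, pool =>
    (PySem.List.enumerate pool).flatMap (fun q =>
      (dfs unique order k (poolStepI unique order pool q.1)).map (fun r => q.2 :: r))

theorem enum_flatMap_snd {β : Type} (f : Int → List β) (pool : List Int) (s : Int) :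
    (PySem.List.enumerate pool s).flatMap (fun q => f q.2) = pool.flatMap f := by
  induction pool generalizing s with
  | nil => simp [PySem.List.enumerate_nil]
  | cons x xs ih => simp [PySem.List.enumerate_cons, ih]

-- A's substate list at entry (i, states[i]) is exactly B's remaining pool
theorem substates_eq (unique order : Bool) (pool : List Int) (j : Nat) (hj : j < pool.length) :
    (if order then PySem.List.slice pool none (some (j : Int)) else [])
      ++ (if !unique then [PySem.List.pyGetD pool (j : Int) 0] else [])
      ++ PySem.List.slice pool (some ((j : Int) + 1)) none
    = poolStepI unique order pool (j : Int) := by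
  have h1 : ((j : Int) + 1) = ((j + 1 : Nat) : Int) := by push_cast; ring
  have h2 : PySem.List.slice pool (some ((j : Int) + 1)) none = pool.drop (j + 1) := by
    rw [h1, PySem.List.slice_from_natCast]
  have h3 : PySem.List.pyGetD pool (j : Int) 0 = pool[j] := PySem.List.pyGetD_ofNat pool j 0 hj
  have h4 : PySem.List.slice pool (some (j : Int)) none = pool.drop j := PySem.List.slice_from_natCast pool j
  have hd : pool.drop j = pool[j] :: pool.drop (j + 1) := List.drop_eq_getElem_cons hj
  unfold poolStepI
  cases unique <;> cases order <;>
    simp [h2, h3, h4, PySem.List.slice_to_natCast, ← hd]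

theorem A_eq_dfs (unique order : Bool) : ∀ (m : Nat) (pool : List Int),
    generateSelections pool ((m + 1 : Nat) : Int) unique order = dfs unique order (m + 1) pool := by
  intro m
  induction m with
  | zero =>
    intro pool
    rw [generateSelections]
    have h1 : ((0 + 1 : Nat) : Int) = 1 := by norm_num
    rw [h1]
    norm_num [dfs]
    rw [enum_flatMap_snd (fun x => [[x]]) pool 0]
    simp [List.map_eq_flatMap]
  | succ m ih =>
    intro pool
    rw [generateSelections]
    have hc0 : ¬ ((m + 1 + 1 : Nat) : Int) < 0 := by omega
    have hc1 : ¬ ((m + 1 + 1 : Nat) : Int) = 0 := by omega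
    have hc2 : ¬ ((m + 1 + 1 : Nat) : Int) = 1 := by omega
    simp only [hc0, hc1, hc2]
    rw [PySem.List.foldl_append_eq_flatMap]
    simp only [List.nil_append, dfs]
    apply List.flatMap_congr
    intro q hq
    rcases (PySem.List.mem_enumerate_iff pool 0 q).1 hq with ⟨j, hj, rfl⟩
    simp only [zero_add]
    rw [substates_eq unique order pool j hj]
    have hn : ((m + 1 + 1 : Nat) : Int) - 1 = ((m + 1 : Nat) : Int) := by push_cast; ring
    rw [hn, ih]
    simp [dfs]

theorem bRound_eq (unique order : Bool) (P : List (List Int × List Int)) :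
    bRound unique order P = P.flatMap (fun sp =>
      (PySem.List.enumerate sp.2).map (fun q => (sp.1 ++ [q.2], poolStepI unique order sp.2 q.1))) := by
  unfold bRound
  simp only [PySem.List.foldl_append_singleton_eq_map]
  rw [PySem.List.foldl_append_eq_flatMap]
  simp

theorem bRound_iterate_nil (unique order : Bool) (k : Nat) :
    (bRound unique order)^[k] [] = [] := by
  induction k with
  | zero => rfl
  | succ k ih => rw [Function.iterate_succ_apply]; exact ih

theorem bLoop_eq_iterate (unique order : Bool) : ∀ (k : Nat) (P : List (List Int × List Int)),
    bLoop unique order k P = (bRound unique order)^[k] P := by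
  intro k
  induction k with
  | zero => intro P; rfl
  | succ k ih =>
    intro P
    rw [bLoop, Function.iterate_succ_apply]
    by_cases hP : P = []
    · subst hP
      rw [if_pos rfl, show bRound unique order [] = [] from rfl, bRound_iterate_nil]
    · rw [if_neg hP, ih]

theorem bfs_eq_dfs (unique order : Bool) : ∀ (k : Nat) (P : List (List Int × List Int)),
    ((bRound unique order)^[k] P).map (fun sp => sp.1)
      = P.flatMap (fun sp => (dfs unique order k sp.2).map (fun r => sp.1 ++ r)) := by
  intro k
  induction k with
  | zero => intro P; simp [dfs, List.map_eq_flatMap]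
  | succ k ih =>
    intro P
    rw [Function.iterate_succ_apply, ih, bRound_eq]
    rw [List.flatMap_assoc]
    apply List.flatMap_congr
    intro sp _
    rw [List.flatMap_map]
    simp only [dfs, List.map_flatMap]
    apply List.flatMap_congr
    intro q _
    simp [List.map_map, Function.comp_def, List.append_assoc]

theorem main_eq (states : List Int) (n : Int) (unique order : Bool) (h : 0 ≤ n) :
    generateSelections states n unique order = generateSelections_alt states n unique order := by
  by_cases h0 : n = 0
  · subst h0
    rw [generateSelections]
    simp [generateSelections_alt]
  · obtain ⟨m, hm⟩ : ∃ m : Nat, n = ((m + 1 : Nat) : Int) := ⟨n.toNat - 1, by omega⟩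
    subst hm
    rw [A_eq_dfs]
    unfold generateSelections_alt
    rw [if_neg (by omega), if_neg (by omega)]
    rw [bLoop_eq_iterate]
    rw [show ((m + 1 : Nat) : Int).toNat = m + 1 from by omega]
    rw [bfs_eq_dfs]
    simp

-- ===== VERDICT (by name: the statement is the Claim_ definition above) =====
theorem generateSelections_spec : Claim_equal_generateSelections := by
  intro states n unique order _ hpre
  exact main_eq states n unique order hpre
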